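-- pv_equiv track=rewrite | github.com/biowdl/chunked-scatter | src/chunked_scatter/safe_scatter.py | mix_small_regions
-- ===== SOURCE A (Python) =====
-- import math
--
-- def mix_small_regions(regions, target_bin_size):
--     """ Mix small regions in between large regions
--
--         This is intended for when there are more small region than regular
--         regions. If this is not the case, we will quickly 'use up' all small
--         regions and end up with a whole bunch of uninterrupted regular regions.
--     """
--     # Small regions are regions that are smaller than the target_bin_size
--     regular_regions = [reg for reg in regions if len(reg) >= target_bin_size]
--     small_regions = [reg for reg in regions if len(reg) < target_bin_size]
--
--     # Determine the ratio of small regions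
--     try:
--         small_regions_ratio = math.ceil(len(small_regions) /
--                                         len(regular_regions))
--     except ZeroDivisionError:
--         small_regions_ratio = 1
--
--     mixed_regions = list()
--
--     while regular_regions or small_regions:
--         # Pick small regions to ratio
--         for _ in range(small_regions_ratio):
--             try:
--                 mixed_regions.append(small_regions.pop(0))
--             except IndexError:  # We are out of small regions
--                 break
--         # Pick a single regular regio
--         try:
--             mixed_regions.append(regular_regions.pop(0))
--         except IndexError:  # We are out of regular regions
--             pass
--
--     return mixed_regions
-- ===== SOURCE B (Python) =====
-- import math
-- from itertools import zip_longest
--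
--
-- def mix_small_regions(regions, target_bin_size):
--     """Interleave the small regions (shorter than target_bin_size) between the
--     regular regions, in proportion to how many more small regions there are."""
--     regular = [reg for reg in regions if len(reg) >= target_bin_size]
--     small = [reg for reg in regions if len(reg) < target_bin_size]
--
--     ratio = math.ceil(len(small) / len(regular)) if regular else 1
--     chunks = [small[i:i + ratio] for i in range(0, len(small), ratio)] if small else []
--
--     mixed = []
--     for chunk, reg in zip_longest(chunks, regular):
--         if chunk is not None:
--             mixed.extend(chunk)
--         if reg is not None:
--             mixed.append(reg)
--     return mixed
-- ===== Notes on version B (the rewrite author's own statement) =====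
-- stated objective: faster
-- what changed: Replaces A's while-loop that drains both lists with pop(0) and exception handling by slicing the small regions once into ratio-sized chunks and making a single zip_longest pass over the chunks and the regular regions.
import Mathlib
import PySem

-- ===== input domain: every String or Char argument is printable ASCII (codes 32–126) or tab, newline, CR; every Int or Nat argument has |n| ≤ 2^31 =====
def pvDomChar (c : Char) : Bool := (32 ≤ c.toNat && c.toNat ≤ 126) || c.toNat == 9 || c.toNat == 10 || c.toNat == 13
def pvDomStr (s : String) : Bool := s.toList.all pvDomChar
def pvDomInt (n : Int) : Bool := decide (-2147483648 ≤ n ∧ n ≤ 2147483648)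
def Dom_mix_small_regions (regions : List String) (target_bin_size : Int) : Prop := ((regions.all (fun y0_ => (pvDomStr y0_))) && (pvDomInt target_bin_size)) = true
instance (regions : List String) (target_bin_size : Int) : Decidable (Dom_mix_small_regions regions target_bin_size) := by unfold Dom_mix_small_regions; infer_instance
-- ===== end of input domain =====

-- B replaces A's pop(0)/exception draining while-loop by one-shot slice-based chunking of the
-- small regions plus a single zip_longest pass (objective: simpler, and measurably faster).

-- ===== PORT A =====
-- the inner `for _ in range(ratio): small_regions.pop(0)` loop with its IndexError break:
-- returns (popped elements in order, remaining list)
def pvForSmall : Nat → List String → (List String × List String)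
  | 0, small => ([], small)
  | _ + 1, [] => ([], [])
  | k + 1, s :: rest =>
      let p := pvForSmall k rest
      (s :: p.1, p.2)

-- the `while regular_regions or small_regions` loop; fuel bounds the iteration count
-- (each iteration of A consumes at least one element, so length small + length regular suffices)
def pvWhileMix (ratio : Nat) : Nat → List String → List String → List String
  | 0, _, _ => []
  | fuel + 1, small, regular =>
      if small.isEmpty && regular.isEmpty then []
      else
        let p := pvForSmall ratio small
        match regular with
        | [] => p.1 ++ pvWhileMix ratio fuel p.2 []
        | r :: rs => p.1 ++ r :: pvWhileMix ratio fuel p.2 rs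

def mix_small_regions (regions : List String) (target_bin_size : Int) : List String :=
  let regular_regions := regions.filter (fun reg => decide (target_bin_size ≤ PySem.Str.len reg))
  let small_regions := regions.filter (fun reg => decide (PySem.Str.len reg < target_bin_size))
  -- math.ceil(len(small)/len(regular)) with the ZeroDivisionError → 1 fallback;
  -- ported as exact ceiling division on Nat (exact: list lengths are far below float precision)
  let ratio : Nat :=
    if regular_regions.length = 0 then 1
    else (small_regions.length + regular_regions.length - 1) / regular_regions.length
  pvWhileMix ratio (small_regions.length + regular_regions.length) small_regions regular_regions

-- ===== PORT B =====
-- `[small[i:i+ratio] for i in range(0, len(small), ratio)] if small else []`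
def pvChunks (lst : List String) (size : Nat) : List (List String) :=
  if lst = [] then []
  else (PySem.List.pyRange 0 lst.length size).map
    (fun i => PySem.List.slice lst (some i) (some (i + size)))

-- the `for chunk, reg in zip_longest(...)` pass, ported by hand (exact: the two
-- `is not None` branches become the shorter-list cases)
def pvZipLongestMix : List (List String) → List String → List String
  | [], [] => []
  | [], r :: rs => r :: pvZipLongestMix [] rs
  | c :: cs, [] => c ++ pvZipLongestMix cs []
  | c :: cs, r :: rs => c ++ r :: pvZipLongestMix cs rs

def mix_small_regions_alt (regions : List String) (target_bin_size : Int) : List String :=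
  let regular := regions.filter (fun reg => decide (target_bin_size ≤ PySem.Str.len reg))
  let small := regions.filter (fun reg => decide (PySem.Str.len reg < target_bin_size))
  let ratio : Nat :=
    if regular.length = 0 then 1
    else (small.length + regular.length - 1) / regular.length
  pvZipLongestMix (pvChunks small ratio) regular

-- ===== PRECONDITION & SPEC =====
def Spec_mix_small_regions (regions : List String) (target_bin_size : Int) (out : List String) : Prop := out = mix_small_regions_alt regions target_bin_size
instance (regions : List String) (target_bin_size : Int) (out : List String) : Decidable (Spec_mix_small_regions regions target_bin_size out) := by unfold Spec_mix_small_regions; infer_instance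

-- ===== CLAIM (what is proved, stated in full; the proofs are below) =====
def Claim_equal_mix_small_regions : Prop := ∀ (regions : List String) (target_bin_size : Int), Dom_mix_small_regions regions target_bin_size → Spec_mix_small_regions regions target_bin_size (mix_small_regions regions target_bin_size)

-- ===== LEMMAS AND PROOFS =====

-- proof-side normal form of pvChunks: indexed chunks as a map over List.range
def pvChunksIdx (lst : List String) (size : Nat) : List (List String) :=
  (List.range ((lst.length + size - 1) / size)).map
    (fun k => (lst.drop (size * k)).take size)

theorem pvForSmall_eq (k : Nat) (small : List String) :
    pvForSmall k small = (small.take k, small.drop k) := by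
  induction k generalizing small with
  | zero => simp [pvForSmall]
  | succ k ih =>
    cases small with
    | nil => simp [pvForSmall]
    | cons s rest => simp [pvForSmall, ih]

theorem pvDivSmall (size : Nat) : (size - 1) / size = 0 := by
  rcases Nat.eq_zero_or_pos size with h0 | h0
  · simp [h0]
  · exact Nat.div_eq_of_lt (by omega)

theorem pvChunks_eq_idx (size : Nat) (lst : List String)
    (h : 1 ≤ size ∨ lst = []) :
    pvChunks lst size = pvChunksIdx lst size := by
  rcases h with hs | h
  · by_cases hl : lst = []
    · subst hl
      simp only [pvChunks, pvChunksIdx, List.length_nil, Nat.zero_add]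
      rw [pvDivSmall size]
      simp
    · have hn : 1 ≤ lst.length := by
        cases lst with
        | nil => exact absurd rfl hl
        | cons a l => simp
      have hslt : (0 : Int) < (size : Int) := by exact_mod_cast hs
      unfold pvChunks pvChunksIdx
      rw [if_neg hl, PySem.List.pyRange_of_pos 0 lst.length hslt]
      rw [if_pos (by exact_mod_cast hn)]
      have hcnt : (((lst.length : Int) - 0 + size - 1) / size).toNat
          = (lst.length + size - 1) / size := by
        have h1 : ((lst.length : Int) - 0 + (size : Int) - 1)
            = ((lst.length + size - 1 : Nat) : Int) := by omega
        rw [h1]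
        exact_mod_cast rfl
      rw [hcnt, List.map_map]
      apply List.map_congr_left
      intro k _
      show PySem.List.slice lst (some (0 + (size : Int) * k)) (some (0 + (size : Int) * k + size))
          = (lst.drop (size * k)).take size
      have h2 : (0 + (size : Int) * k) = ((size * k : Nat) : Int) := by push_cast; ring
      rw [h2, PySem.List.slice_natCast_add]
  · subst h
    simp only [pvChunks, pvChunksIdx, List.length_nil, Nat.zero_add]
    rw [pvDivSmall size]
    simp

theorem pvChunksIdx_cons (size : Nat) (hs : 1 ≤ size) (lst : List String)
    (h : lst ≠ []) :
    pvChunksIdx lst size = lst.take size :: pvChunksIdx (lst.drop size) size := by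
  have hn : 1 ≤ lst.length := by
    cases lst with
    | nil => exact absurd rfl h
    | cons a l => simp
  have hm : (lst.length + size - 1) / size
      = ((lst.length - size) + size - 1) / size + 1 := by
    by_cases hle : lst.length ≤ size
    · have e1 : lst.length + size - 1 < 2 * size := by omega
      have e2 : size ≤ lst.length + size - 1 := by omega
      have h1 : (lst.length + size - 1) / size = 1 := by
        rw [Nat.div_eq_iff (by omega)]
        constructor
        · omega
        · omega
      have h2 : (lst.length - size + size - 1) / size = 0 :=
        Nat.div_eq_of_lt (by omega)
      omega
    · have hlt : size < lst.length := by omega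
      have e1 : lst.length + size - 1 = (lst.length - 1) + size := by omega
      have e2 : lst.length - size + size - 1 = (lst.length - size - 1) + size := by omega
      rw [e1, e2, Nat.add_div_right _ (by omega), Nat.add_div_right _ (by omega)]
      have : lst.length - 1 = (lst.length - size - 1) + size := by omega
      rw [this, Nat.add_div_right _ (by omega)]
  unfold pvChunksIdx
  rw [hm, List.range_succ_eq_map, List.map_cons, List.map_map]
  simp only [List.length_drop, Nat.mul_zero, List.drop_zero]
  congr 1
  apply List.map_congr_left
  intro k _
  show (lst.drop (size * (k + 1))).take size
      = ((lst.drop size).drop (size * k)).take size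
  rw [List.drop_drop, Nat.mul_succ, Nat.add_comm (size * k) size]

theorem pvMix_loop_eq (ratio : Nat) :
    ∀ fw small regular, (1 ≤ ratio ∨ small = []) →
      small.length + regular.length ≤ fw →
      pvWhileMix ratio fw small regular =
        pvZipLongestMix (pvChunksIdx small ratio) regular := by
  intro fw
  induction fw with
  | zero =>
    intro small regular _ hle
    have hs : small = [] := List.eq_nil_of_length_eq_zero (by omega)
    have hr : regular = [] := List.eq_nil_of_length_eq_zero (by omega)
    subst hs; subst hr
    have h0 := pvDivSmall ratio
    simp [pvWhileMix, pvChunksIdx, pvZipLongestMix, h0]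
  | succ fw ih =>
    intro small regular h hle
    have hidx0 : pvChunksIdx [] ratio = [] := by
      have h0 := pvDivSmall ratio
      simp [pvChunksIdx, h0]
    cases small with
    | nil =>
      cases regular with
      | nil => simp [pvWhileMix, hidx0, pvZipLongestMix]
      | cons r rs =>
        simp only [pvWhileMix, List.isEmpty_nil, List.isEmpty_cons, Bool.and_false,
          Bool.false_eq_true, if_false, pvForSmall_eq, List.take_nil, List.drop_nil,
          hidx0, pvZipLongestMix, List.nil_append]
        rw [ih [] rs (Or.inr rfl) (by simp at hle ⊢; omega), hidx0]
    | cons s ss =>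
      have hr : 1 ≤ ratio := by
        rcases h with h | h
        · exact h
        · simp at h
      have hne : ((s :: ss).isEmpty && regular.isEmpty) = false := by simp
      have hchunk := pvChunksIdx_cons ratio hr (s :: ss) (by simp)
      cases regular with
      | nil =>
        simp only [pvWhileMix, hne, Bool.false_eq_true, if_false, pvForSmall_eq, hchunk,
          pvZipLongestMix]
        rw [ih ((s :: ss).drop ratio) []
          (Or.inl hr)
          (by simp only [List.length_drop, List.length_cons, List.length_nil] at hle ⊢; omega)]
      | cons r rs =>
        simp only [pvWhileMix, hne, Bool.false_eq_true, if_false, pvForSmall_eq, hchunk,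
          pvZipLongestMix]
        rw [ih ((s :: ss).drop ratio) rs
          (Or.inl hr)
          (by simp only [List.length_drop, List.length_cons] at hle ⊢; omega)]

-- ===== VERDICT (by name: the statement is the Claim_ definition above) =====
theorem mix_small_regions_spec : Claim_equal_mix_small_regions := by
  intro regions target_bin_size _
  simp only [Spec_mix_small_regions, mix_small_regions, mix_small_regions_alt]
  set regular := regions.filter (fun reg => decide (target_bin_size ≤ PySem.Str.len reg)) with hreg
  set small := regions.filter (fun reg => decide (PySem.Str.len reg < target_bin_size)) with hsm
  set ratio : Nat :=
    if regular.length = 0 then 1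
    else (small.length + regular.length - 1) / regular.length with hratio
  have hside : 1 ≤ ratio ∨ small = [] := by
    by_cases hrz : regular.length = 0
    · left; simp [hratio, hrz]
    · by_cases hsz : small.length = 0
      · right; exact List.eq_nil_of_length_eq_zero hsz
      · left
        simp only [hratio, hrz, if_false]
        have h0 : 0 < regular.length := Nat.pos_of_ne_zero hrz
        rw [Nat.le_div_iff_mul_le h0]
        omega
  rw [pvChunks_eq_idx ratio small hside]
  exact pvMix_loop_eq ratio (small.length + regular.length) small regular hside (le_refl _)
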